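-- pv_equiv track=rewrite | github.com/OpenJosiah/Wandering_Sword_mod | yijian_mod_creat/fuc_main2minor.py | purify_func_name
-- ===== SOURCE A (Python) =====
-- def final_segment(name: str) -> str:
--     if not isinstance(name, str):
--         return ""
--     parts = name.split(".")
--     return parts[-1] if parts else name
--
-- def purify_func_name(name: str) -> str:
--     seg = final_segment(name)
--     i = len(seg)
--     while True:
--         j = seg.rfind("_", 0, i)
--         if j == -1:
--             break
--         tail = seg[j+1:i]
--         if tail.isdigit():
--             i = j
--         else:
--             break
--     return seg[:i]
-- ===== SOURCE B (Python) =====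
-- def final_segment(name: str) -> str:
--     if not isinstance(name, str):
--         return ""
--     parts = name.split(".")
--     return parts[-1] if parts else name
--
-- def purify_func_name(name: str) -> str:
--     seg = final_segment(name)
--     tokens = []
--     cur = []
--     for c in seg:
--         if c == "_":
--             tokens.append("".join(cur))
--             cur = []
--         else:
--             cur.append(c)
--     tokens.append("".join(cur))
--     while len(tokens) > 1 and tokens[-1].isdigit():
--         tokens.pop()
--     return "_".join(tokens)
-- ===== Notes on version B (the rewrite author's own statement) =====
-- stated objective: alternative
-- what changed: Replaces the repeated rfind-with-shrinking-end-index scan over the segment by a single forward tokenization pass on the underscore separator, then popping all-digit tokens off the end of the token list and rejoining.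
import Mathlib
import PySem

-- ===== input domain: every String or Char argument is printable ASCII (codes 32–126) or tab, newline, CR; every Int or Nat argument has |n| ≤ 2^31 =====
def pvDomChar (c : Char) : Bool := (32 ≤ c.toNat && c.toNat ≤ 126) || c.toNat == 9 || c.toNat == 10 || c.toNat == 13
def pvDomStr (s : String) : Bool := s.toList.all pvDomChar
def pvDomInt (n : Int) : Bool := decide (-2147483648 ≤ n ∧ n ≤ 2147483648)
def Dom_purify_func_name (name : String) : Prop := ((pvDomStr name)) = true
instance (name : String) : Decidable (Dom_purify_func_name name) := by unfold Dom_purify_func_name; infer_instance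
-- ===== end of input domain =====

-- B replaces A's repeated rfind scan (shrinking end index) by one forward tokenization on '_'
-- followed by popping all-digit tokens off the end of the token list and rejoining.

-- ===== PORT A =====

-- final_segment: the isinstance guard is always true for a String argument; parts = name.split(".")
-- is never empty, so 'parts[-1] if parts else name' is pyGet? parts (-1) with the none case = name.
def pfnFinalSegment (name : String) : String :=
  match PySem.List.pyGet? (PySem.Chars.splitOn name.toList ['.']) (-1) with
  | some p => String.ofList p
  | none => name

-- used by pfnLoopA's decreasing_by: the index returned by rfind(seg, '_', 0, i) is < i when ≠ -1
theorem pfn_go_cases (s sub : List Char) (k : Nat) :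
    PySem.Chars.rfind.go s sub k = -1 ∨
      ∃ p : Nat, PySem.Chars.rfind.go s sub k = (p : Int) ∧ p ≤ k ∧ sub.isPrefixOf (s.drop p) := by
  induction k with
  | zero =>
      by_cases h : sub.isPrefixOf s
      · exact Or.inr ⟨0, by simp [PySem.Chars.rfind.go, h], Nat.le_refl _, by simpa using h⟩
      · exact Or.inl (by simp [PySem.Chars.rfind.go, h])
  | succ j ih =>
      by_cases h : sub.isPrefixOf (s.drop (j+1))
      · exact Or.inr ⟨j+1, by simp [PySem.Chars.rfind.go, h], Nat.le_refl _, h⟩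
      · rcases ih with h0 | ⟨p, hp, hle, hpre⟩
        · exact Or.inl (by simp [PySem.Chars.rfind.go, h, h0])
        · exact Or.inr ⟨p, by simp [PySem.Chars.rfind.go, h, hp], Nat.le_succ_of_le hle, hpre⟩

theorem pfn_rfind_lt (l : List Char) (h : PySem.Chars.rfind l ['_'] ≠ -1) :
    0 ≤ PySem.Chars.rfind l ['_'] ∧ (PySem.Chars.rfind l ['_']).toNat < l.length := by
  rcases pfn_go_cases l ['_'] l.length with h0 | ⟨p, hp, hle, hpre⟩
  · exact absurd (by simpa [PySem.Chars.rfind] using h0) h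
  · have hp' : PySem.Chars.rfind l ['_'] = (p : Int) := by simpa [PySem.Chars.rfind] using hp
    have hne : l.drop p ≠ [] := by
      intro hnil
      simp [hnil] at hpre
    have hlt : p < l.length := by
      by_contra hge
      exact hne (List.drop_eq_nil_of_le (Nat.le_of_not_lt hge))
    exact ⟨by simp [hp'], by simp [hp', hlt]⟩

theorem pfn_rfindFrom_eq (cs : List Char) (i : Nat) :
    PySem.Chars.rfindFrom cs ['_'] 0 (some (i : Int)) = PySem.Chars.rfind (cs.take i) ['_'] := by
  simp only [PySem.Chars.rfindFrom]
  have h0 : ¬ ((i : Int) < 0) := by omega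
  have hn0 : ¬ ((cs.length : Int) < 0) := by omega
  by_cases hni : (cs.length : Int) < (i : Int)
  · have : cs.length ≤ i := by omega
    simp [hni, hn0, List.take_of_length_le this]
    intro h; omega
  · simp [hni, h0]
    intro h; omega

def pfnLoopA (cs : List Char) (i : Nat) : Nat :=
  let j := PySem.Chars.rfindFrom cs ['_'] 0 (some (i : Int))
  if hj : j = -1 then i
  else
    let tail := PySem.Chars.slice cs (some (j + 1)) (some (i : Int))
    if PySem.Chars.strIsdigit tail then pfnLoopA cs j.toNat else i
termination_by i
decreasing_by
  have h := pfn_rfind_lt (cs.take i) (by rw [← pfn_rfindFrom_eq]; exact hj)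
  rw [pfn_rfindFrom_eq]
  have := List.length_take_le i cs
  omega

def purify_func_name (name : String) : String :=
  let seg := pfnFinalSegment name
  let i := pfnLoopA seg.toList seg.toList.length
  PySem.Str.slice seg none (some (i : Int))

-- ===== PORT B =====

def pfnTokStep (st : List (List Char) × List Char) (c : Char) : List (List Char) × List Char :=
  if c = '_' then (st.1 ++ [st.2], []) else (st.1, st.2 ++ [c])

def pfnPop (ts : List (List Char)) : List (List Char) :=
  if 1 < ts.length ∧ PySem.Chars.strIsdigit (ts.getLast?.getD []) then pfnPop ts.dropLast
  else ts
termination_by ts.length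
decreasing_by simp [List.length_dropLast]; omega

def purify_func_name_alt (name : String) : String :=
  let seg := pfnFinalSegment name
  let st := seg.toList.foldl pfnTokStep ([], [])
  let tokens := st.1 ++ [st.2]
  String.ofList (PySem.Chars.join ['_'] (pfnPop tokens))

-- ===== PRECONDITION & SPEC =====
def Spec_purify_func_name (name : String) (out : String) : Prop := out = purify_func_name_alt name
instance (name : String) (out : String) : Decidable (Spec_purify_func_name name out) := by unfold Spec_purify_func_name; infer_instance

-- ===== CLAIM (what is proved, stated in full; the proofs are below) =====
def Claim_equal_purify_func_name : Prop := ∀ (name : String), Dom_purify_func_name name → Spec_purify_func_name name (purify_func_name name)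

-- ===== LEMMAS AND PROOFS =====

theorem pfn_prefix_underscore {x : List Char} (h : (['_'] : List Char).isPrefixOf x) : '_' ∈ x := by
  have := List.isPrefixOf_iff_prefix.mp h
  exact this.mem (by simp)

theorem pfn_go_not_mem {l : List Char} (h : '_' ∉ l) (k : Nat) :
    PySem.Chars.rfind.go l ['_'] k = -1 := by
  induction k with
  | zero =>
      have : ¬ (['_'] : List Char).isPrefixOf l := fun hp => h (pfn_prefix_underscore hp)
      simp [PySem.Chars.rfind.go, this]
  | succ j ih =>
      have : ¬ (['_'] : List Char).isPrefixOf (l.drop (j+1)) := fun hp =>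
        h (List.mem_of_mem_drop (pfn_prefix_underscore hp))
      simp [PySem.Chars.rfind.go, this, ih]

theorem pfn_go_last {a b : List Char} (h : '_' ∉ b) (k : Nat) (hk : a.length ≤ k) :
    PySem.Chars.rfind.go (a ++ '_' :: b) ['_'] k = (a.length : Int) := by
  induction k with
  | zero =>
      have ha : a = [] := List.eq_nil_of_length_eq_zero (Nat.le_zero.mp hk)
      subst ha
      simp [PySem.Chars.rfind.go]
  | succ j ih =>
      by_cases he : a.length = j + 1
      · have : (a ++ '_' :: b).drop (j+1) = '_' :: b := by
          rw [← he]; exact List.drop_left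
        simp [PySem.Chars.rfind.go, this, he]
      · have hlt : a.length ≤ j := by omega
        have hd : (a ++ '_' :: b).drop (j+1) = b.drop (j - a.length) := by
          have h1 : j + 1 = a.length + (j - a.length + 1) := by omega
          rw [h1]
          simp
        have : ¬ (['_'] : List Char).isPrefixOf ((a ++ '_' :: b).drop (j+1)) := by
          rw [hd]; exact fun hp => h (List.mem_of_mem_drop (pfn_prefix_underscore hp))
        simp [PySem.Chars.rfind.go, this, ih hlt]


theorem pfn_rfind_none {l : List Char} (h : '_' ∉ l) : PySem.Chars.rfind l ['_'] = -1 := by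
  simpa [PySem.Chars.rfind] using pfn_go_not_mem h l.length

theorem pfn_rfind_last {a b : List Char} (h : '_' ∉ b) :
    PySem.Chars.rfind (a ++ '_' :: b) ['_'] = (a.length : Int) := by
  simpa [PySem.Chars.rfind] using pfn_go_last h (a ++ '_' :: b).length (by simp)

theorem pfn_last_underscore {cs : List Char} (h : '_' ∈ cs) :
    ∃ a b, cs = a ++ '_' :: b ∧ '_' ∉ b := by
  induction cs using List.reverseRecOn with
  | nil => simp at h
  | append_singleton xs x ih =>
      by_cases hx : x = '_'
      · exact ⟨xs, [], by simp [hx], by simp⟩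
      · have hm : '_' ∈ xs := by
          rcases List.mem_append.mp h with h1 | h1
          · exact h1
          · simp at h1; exact absurd h1.symm hx
        rcases ih hm with ⟨a, b, hab, hb⟩
        exact ⟨a, b ++ [x], by simp [hab], by
          intro hmem
          rcases List.mem_append.mp hmem with h1 | h1
          · exact hb h1
          · simp at h1; exact hx h1.symm⟩

theorem pfn_fold_no_underscore {cs : List Char} (h : '_' ∉ cs) (ts : List (List Char)) (cur : List Char) :
    cs.foldl pfnTokStep (ts, cur) = (ts, cur ++ cs) := by
  induction cs generalizing cur with
  | nil => simp
  | cons c rest ih =>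
      have hc : c ≠ '_' := fun hc => h (by simp [hc])
      have hr : '_' ∉ rest := fun hm => h (by simp [hm])
      simp [List.foldl_cons, pfnTokStep, hc, ih hr]

theorem pfn_tokens_split {a b : List Char} (h : '_' ∉ b) :
    (a ++ '_' :: b).foldl pfnTokStep ([], []) =
      ((a.foldl pfnTokStep ([], [])).1 ++ [(a.foldl pfnTokStep ([], [])).2], b) := by
  rw [List.foldl_append, List.foldl_cons]
  have : pfnTokStep (a.foldl pfnTokStep ([], [])) '_' =
      ((a.foldl pfnTokStep ([], [])).1 ++ [(a.foldl pfnTokStep ([], [])).2], []) := by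
    simp [pfnTokStep]
  rw [this, pfn_fold_no_underscore h]
  simp

theorem pfn_join_append (ts : List (List Char)) (b : List Char) (h : ts ≠ []) :
    PySem.Chars.join ['_'] (ts ++ [b]) = PySem.Chars.join ['_'] ts ++ '_' :: b := by
  induction ts with
  | nil => exact absurd rfl h
  | cons p rest ih =>
      cases rest with
      | nil => simp [PySem.Chars.join_cons_cons, PySem.Chars.join_singleton]
      | cons q r =>
          have h' := ih (by simp)
          simp only [List.cons_append] at h' ⊢
          rw [PySem.Chars.join_cons_cons, h', PySem.Chars.join_cons_cons]
          simp

theorem pfn_pop_pop {ts : List (List Char)} {b : List Char} (h1 : ts ≠ [])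
    (h2 : PySem.Chars.strIsdigit b) : pfnPop (ts ++ [b]) = pfnPop ts := by
  rw [pfnPop]
  have hl : 1 < (ts ++ [b]).length := by
    cases ts with | nil => exact absurd rfl h1 | cons x xs => simp
  simp [h2]
  exact fun h => absurd h h1

theorem pfn_pop_stop {ts : List (List Char)} {b : List Char}
    (h2 : ¬ PySem.Chars.strIsdigit b) : pfnPop (ts ++ [b]) = ts ++ [b] := by
  rw [pfnPop]
  simp [h2]

theorem pfn_pop_single (b : List Char) : pfnPop [b] = [b] := by
  rw [pfnPop]; simp


theorem pfn_loopA_le (cs : List Char) (i : Nat) : pfnLoopA cs i ≤ i := by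
  induction i using Nat.strong_induction_on generalizing cs with
  | _ i ih =>
    rw [pfnLoopA]
    by_cases hj : PySem.Chars.rfindFrom cs ['_'] 0 (some (i : Int)) = -1
    · simp [hj]
    · have hb := pfn_rfind_lt (cs.take i) (by rw [← pfn_rfindFrom_eq]; exact hj)
      have hlt : (PySem.Chars.rfindFrom cs ['_'] 0 (some (i : Int))).toNat < i := by
        rw [pfn_rfindFrom_eq]
        have := List.length_take_le i cs
        omega
      simp only [hj, dite_false]
      split
      · exact Nat.le_of_lt (Nat.lt_of_le_of_lt (ih _ hlt cs) hlt)
      · exact Nat.le_refl i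

theorem pfn_loopA_restrict : ∀ (i : Nat) (cs : List Char), i ≤ cs.length →
    pfnLoopA cs i = pfnLoopA (cs.take i) i := by
  intro i
  induction i using Nat.strong_induction_on with
  | _ i ih =>
    intro cs hi
    conv_lhs => rw [pfnLoopA]
    conv_rhs => rw [pfnLoopA]
    have hjeq : PySem.Chars.rfindFrom (cs.take i) ['_'] 0 (some (i : Int)) =
        PySem.Chars.rfindFrom cs ['_'] 0 (some (i : Int)) := by
      rw [pfn_rfindFrom_eq, pfn_rfindFrom_eq, List.take_take, Nat.min_self]
    rw [hjeq]
    by_cases hj : PySem.Chars.rfindFrom cs ['_'] 0 (some (i : Int)) = -1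
    · simp [hj]
    · have hb := pfn_rfind_lt (cs.take i) (by rw [← pfn_rfindFrom_eq]; exact hj)
      rw [pfn_rfindFrom_eq] at *
      set j := PySem.Chars.rfind (cs.take i) ['_'] with hjdef
      obtain ⟨hj0, hjlt⟩ := hb
      have hlen := List.length_take_le i cs
      have hlti : j.toNat < i := by omega
      have htail : PySem.Chars.slice (cs.take i) (some (j + 1)) (some (i : Int)) =
          PySem.Chars.slice cs (some (j + 1)) (some (i : Int)) := by
        have h1 : j + 1 = ((j.toNat + 1 : Nat) : Int) := by omega
        rw [h1]
        simp only [PySem.Chars.slice_eq_listSlice, PySem.List.slice_natCast]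
        rw [List.drop_take, List.take_take]
        congr 1
        omega
      rw [htail]
      simp only [hj, dite_false]
      split
      · rw [ih j.toNat hlti cs (by omega), ih j.toNat hlti (cs.take i) (by omega),
          List.take_take]
        congr 2
        omega
      · rfl

theorem pfn_join_tokens : ∀ (n : Nat) (cs : List Char), cs.length = n →
    PySem.Chars.join ['_'] ((cs.foldl pfnTokStep ([], [])).1 ++ [(cs.foldl pfnTokStep ([], [])).2]) = cs := by
  intro n
  induction n using Nat.strong_induction_on with
  | _ n ih =>
    intro cs hn
    by_cases hm : '_' ∈ cs
    · rcases pfn_last_underscore hm with ⟨a, b, hab, hb⟩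
      subst hab
      rw [pfn_tokens_split hb]
      dsimp only
      rw [pfn_join_append _ _ (by simp),
        ih a.length (by simp at hn; omega) a rfl]
    · rw [pfn_fold_no_underscore hm]
      dsimp only
      rw [List.nil_append, PySem.Chars.join_singleton]
      simp

theorem pfn_rfindFrom_full (cs : List Char) :
    PySem.Chars.rfindFrom cs ['_'] 0 (some (cs.length : Int)) = PySem.Chars.rfind cs ['_'] := by
  rw [pfn_rfindFrom_eq, List.take_length]

theorem pfn_main_aux : ∀ (n : Nat) (cs : List Char), cs.length = n →
    cs.take (pfnLoopA cs cs.length) =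
      PySem.Chars.join ['_']
        (pfnPop ((cs.foldl pfnTokStep ([], [])).1 ++ [(cs.foldl pfnTokStep ([], [])).2])) := by
  intro n
  induction n using Nat.strong_induction_on with
  | _ n ih =>
    intro cs hn
    by_cases hm : '_' ∈ cs
    · rcases pfn_last_underscore hm with ⟨a, b, hab, hb⟩
      subst hab
      set cs := a ++ '_' :: b with hcs
      have hj : PySem.Chars.rfindFrom cs ['_'] 0 (some (cs.length : Int)) = (a.length : Int) := by
        rw [pfn_rfindFrom_full]; exact pfn_rfind_last hb
      have hjne : PySem.Chars.rfindFrom cs ['_'] 0 (some (cs.length : Int)) ≠ -1 := by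
        rw [hj]; omega
      have htail : PySem.Chars.slice cs (some ((a.length : Int) + 1)) (some (cs.length : Int)) = b := by
        have h1 : (a.length : Int) + 1 = ((a.length + 1 : Nat) : Int) := by omega
        have h2 : a.length + 1 = (a ++ ['_']).length := by simp
        have h3 : cs.length = a.length + 1 + b.length := by simp [hcs]; omega
        rw [h1, PySem.Chars.slice_eq_listSlice, h3, PySem.List.slice_natCast]
        have h4 : cs.drop (a.length + 1) = b := by
          rw [hcs, h2, show (a ++ '_' :: b) = (a ++ ['_']) ++ b by simp, List.drop_left]
        rw [h4]
        simp
      conv_lhs => rw [pfnLoopA]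
      rw [hj] at hjne ⊢
      simp only [hjne, dite_false, htail]
      rw [pfn_tokens_split hb]
      dsimp only
      by_cases hd : PySem.Chars.strIsdigit b
      · simp only [hd, if_true]
        have hlen : a.length ≤ cs.length := by simp [hcs]
        have hrec : pfnLoopA cs (a.length : Int).toNat = pfnLoopA a a.length := by
          rw [Int.toNat_natCast, pfn_loopA_restrict a.length cs hlen, hcs, List.take_left]
        rw [hrec, pfn_pop_pop (by simp) hd]
        have hr := pfn_loopA_le a a.length
        rw [hcs, List.take_append_of_le_length hr]
        exact ih a.length (by rw [hcs] at hn; simp at hn; omega) a rfl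
      · simp only [hd, Bool.false_eq_true, if_false, List.take_length]
        rw [pfn_pop_stop hd, pfn_join_append _ _ (by simp),
          pfn_join_tokens a.length a rfl]
    · have hj : PySem.Chars.rfindFrom cs ['_'] 0 (some (cs.length : Int)) = -1 := by
        rw [pfn_rfindFrom_full]; exact pfn_rfind_none hm
      rw [pfnLoopA]
      simp only [hj, dite_true]
      rw [List.take_length, pfn_fold_no_underscore hm]
      dsimp only
      rw [List.nil_append, pfn_pop_single, PySem.Chars.join_singleton]
      simp

theorem pfn_main (cs : List Char) :
    cs.take (pfnLoopA cs cs.length) =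
      PySem.Chars.join ['_']
        (pfnPop ((cs.foldl pfnTokStep ([], [])).1 ++ [(cs.foldl pfnTokStep ([], [])).2])) :=
  pfn_main_aux cs.length cs rfl

-- ===== VERDICT (by name: the statement is the Claim_ definition above) =====
theorem purify_func_name_spec : Claim_equal_purify_func_name := by
  intro name _
  unfold Spec_purify_func_name purify_func_name purify_func_name_alt
  dsimp only
  rw [← String.toList_inj, String.toList_ofList, PySem.Str.toList_slice,
    PySem.Chars.slice_eq_listSlice, PySem.List.slice_to _ (by omega),
    Int.toNat_natCast]
  exact pfn_main (pfnFinalSegment name).toList
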